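-- pv_equiv track=rewrite | github.com/FragileTech/fragile | src/fragile/fractalai/qft/dashboard/gevp_dashboard.py | channel_family_key
-- ===== SOURCE A (Python) =====
-- COMPANION_SUFFIX = "_companion"
--
-- SPATIAL_PREFIX = "spatial_"
--
-- def base_channel_name(name: str) -> str:
--     raw = str(name)
--     if raw.endswith(COMPANION_SUFFIX):
--         return raw[: -len(COMPANION_SUFFIX)]
--     if raw.startswith(SPATIAL_PREFIX):
--         return raw[len(SPATIAL_PREFIX) :]
--     return raw
--
-- def channel_family_key(name: str) -> str:
--     """Map operator names to a channel family used in redundancy analysis."""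
--     base = base_channel_name(str(name))
--     for prefix in (
--         "nucleon",
--         "pseudoscalar",
--         "scalar",
--         "vector",
--         "axial_vector",
--         "glueball",
--         "tensor",
--     ):
--         if base == prefix or base.startswith(f"{prefix}_"):
--             return prefix
--     if "_" in base:
--         return base.split("_", maxsplit=1)[0]
--     return base
-- ===== SOURCE B (Python) =====
-- COMPANION_SUFFIX = "_companion"
--
-- SPATIAL_PREFIX = "spatial_"
--
-- def base_channel_name(name: str) -> str:
--     raw = str(name)
--     if raw.endswith(COMPANION_SUFFIX):
--         return raw[: -len(COMPANION_SUFFIX)]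
--     if raw.startswith(SPATIAL_PREFIX):
--         return raw[len(SPATIAL_PREFIX) :]
--     return raw
--
-- def channel_family_key(name: str) -> str:
--     """Map operator names to a channel family used in redundancy analysis."""
--     base = base_channel_name(str(name))
--     # "axial_vector" is the only family name containing "_"; every other
--     # branch of the original whitelist returns the text before the first "_".
--     if base == "axial_vector" or base.startswith("axial_vector_"):
--         return "axial_vector"
--     return base.partition("_")[0]
-- ===== Notes on version B (the rewrite author's own statement) =====
-- stated objective: simpler
-- what changed: B drops A's seven-prefix whitelist loop entirely: since every whitelisted family name except "axial_vector" is underscore-free, B special-cases "axial_vector" and otherwise returns base.partition("_")[0], the text before the first underscore.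
import Mathlib
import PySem

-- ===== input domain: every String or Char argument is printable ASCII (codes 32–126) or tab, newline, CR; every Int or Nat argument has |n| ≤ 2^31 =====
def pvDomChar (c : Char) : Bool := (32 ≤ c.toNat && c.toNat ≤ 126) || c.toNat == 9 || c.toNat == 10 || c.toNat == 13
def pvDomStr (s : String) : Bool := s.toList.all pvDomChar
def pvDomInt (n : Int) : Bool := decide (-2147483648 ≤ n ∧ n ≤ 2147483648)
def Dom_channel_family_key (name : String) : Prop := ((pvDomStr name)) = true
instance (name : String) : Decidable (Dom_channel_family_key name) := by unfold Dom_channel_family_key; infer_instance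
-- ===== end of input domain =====

-- B replaces A's seven-prefix whitelist loop by one special case for "axial_vector"
-- (the only listed family name containing "_") plus "text before the first underscore" (simpler).

-- ===== PORT A =====
-- helper shared by both Pythons (module-level base_channel_name)
def base_channel_name (name : String) : String :=
  let raw := name
  if PySem.Str.endswith raw "_companion" then PySem.Str.slice raw none (some (-10))  -- raw[:-len("_companion")]
  else if PySem.Str.startswith raw "spatial_" then PySem.Str.slice raw (some 8) none -- raw[len("spatial_"):]
  else raw

-- A's for-loop over the prefix tuple, its early return rendered as Option
def familyLoop (prefixes : List String) (base : String) : Option String :=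
  match prefixes with
  | [] => none
  | p :: ps =>
    if base == p || PySem.Str.startswith base (p ++ "_") then some p
    else familyLoop ps base

def channel_family_key (name : String) : String :=
  let base := base_channel_name name
  match familyLoop ["nucleon", "pseudoscalar", "scalar", "vector", "axial_vector", "glueball", "tensor"] base with
  | some p => p
  | none =>
    if PySem.Str.isIn "_" base then
      match PySem.Str.splitMax? base "_" 1 with   -- base.split("_", maxsplit=1)[0]
      | some (x :: _) => x
      | _ => ""                                   -- unreachable: sep "_" is non-empty, so split never returns none/[]
    else base

-- ===== PORT B =====
def channel_family_key_alt (name : String) : String :=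
  let base := base_channel_name name
  if base == "axial_vector" || PySem.Str.startswith base "axial_vector_" then "axial_vector"
  else String.ofList (base.toList.takeWhile (· != '_'))  -- hand port of base.partition("_")[0], exact for the 1-char separator

-- ===== PRECONDITION & SPEC =====
def Spec_channel_family_key (name : String) (out : String) : Prop := out = channel_family_key_alt name
instance (name : String) (out : String) : Decidable (Spec_channel_family_key name out) := by unfold Spec_channel_family_key; infer_instance

-- ===== CLAIM (what is proved, stated in full; the proofs are below) =====
def Claim_equal_channel_family_key : Prop := ∀ (name : String), Dom_channel_family_key name → Spec_channel_family_key name (channel_family_key name)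

-- ===== LEMMAS AND PROOFS =====

-- a condition of A's loop, transported to the character-list level
theorem condc {b p : String} {pul : List Char}
    (h : b = p ∨ PySem.Chars.startswith b.toList pul = true) :
    b.toList = p.toList ∨ pul <+: b.toList := by
  rcases h with rfl | h
  · exact Or.inl rfl
  · exact Or.inr ((PySem.Chars.startswith_iff _ _).mp h)

-- two matched family names are comparable prefixes of base, so non-nested names never both match
theorem cond_conflict {b : String} {p1 pu1 p2 pu2 : List Char}
    (h1 : b.toList = p1 ∨ pu1 <+: b.toList) (h2 : b.toList = p2 ∨ pu2 <+: b.toList)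
    (hp1 : p1 <+: pu1) (hp2 : p2 <+: pu2)
    (hno : ¬ (p1 <+: p2) ∧ ¬ (p2 <+: p1)) : False := by
  have g1 : p1 <+: b.toList := by
    rcases h1 with e | h1
    · exact e ▸ List.prefix_refl _
    · exact hp1.trans h1
  have g2 : p2 <+: b.toList := by
    rcases h2 with e | h2
    · exact e ▸ List.prefix_refl _
    · exact hp2.trans h2
  rcases List.prefix_or_prefix_of_prefix g1 g2 with h | h
  · exact hno.1 h
  · exact hno.2 h

-- a matched underscore-free family name is exactly the text before the first '_'
theorem takeWhile_cond {cs p : List Char} (hp : ∀ x ∈ p, (x != '_') = true)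
    (h : cs = p ∨ p ++ ['_'] <+: cs) : cs.takeWhile (· != '_') = p := by
  rcases h with rfl | ⟨t, ht⟩
  · exact List.takeWhile_eq_self_iff.mpr hp
  · subst ht
    rw [List.append_assoc, List.takeWhile_append]
    simp_all

theorem match_case {b p : String} {pul : List Char}
    (hpu : pul = p.toList ++ ['_'])
    (hnu : ∀ x ∈ p.toList, (x != '_') = true)
    (h : b = p ∨ PySem.Chars.startswith b.toList pul = true) :
    String.ofList (b.toList.takeWhile (· != '_')) = p := by
  have ht : b.toList.takeWhile (· != '_') = p.toList := by
    apply takeWhile_cond hnu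
    rcases condc h with e | hh
    · exact Or.inl e
    · exact Or.inr (hpu ▸ hh)
  rw [ht, String.ofList_toList]

theorem go_zero (fuel : Nat) (l cur : List Char) (acc : List (List Char)) :
    PySem.Chars.splitOnMax.go ['_'] fuel 0 l cur acc = ((cur.reverse ++ l) :: acc).reverse := by
  cases fuel <;> cases l <;> simp [PySem.Chars.splitOnMax.go]

theorem go_one (fuel : Nat) (l cur : List Char) (acc : List (List Char)) (hf : l.length < fuel) :
    PySem.Chars.splitOnMax.go ['_'] fuel 1 l cur acc =
      if '_' ∈ l then
        (l.drop ((l.takeWhile (· != '_')).length + 1) :: (cur.reverse ++ l.takeWhile (· != '_')) :: acc).reverse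
      else ((cur.reverse ++ l) :: acc).reverse := by
  induction fuel generalizing l cur acc with
  | zero => omega
  | succ n ih =>
    cases l with
    | nil => simp [PySem.Chars.splitOnMax.go]
    | cons c rest =>
      by_cases hc : c = '_'
      · subst hc
        simp only [PySem.Chars.splitOnMax.go]
        simp [go_zero]
      · have hc' : ¬ '_' = c := fun h => hc h.symm
        simp only [PySem.Chars.splitOnMax.go]
        have hpre : ['_'].isPrefixOf (c :: rest) = false := by
          simp [List.isPrefixOf]; exact hc'
        rw [ih rest (c :: cur) acc (by simp at hf ⊢; omega)]
        by_cases hm : '_' ∈ rest <;> simp [hpre, hm, hc, hc']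

-- head of base.split("_", maxsplit=1) when base contains '_'
theorem split_head (b : String) (h : '_' ∈ b.toList) :
    (match PySem.Str.splitMax? b "_" 1 with | some (x :: _) => x | _ => "") =
      String.ofList (b.toList.takeWhile (· != '_')) := by
  have h1 : "_".toList = ['_'] := rfl
  simp only [PySem.Str.splitMax?, PySem.Chars.splitMax?, PySem.Chars.splitOnMax, h1]
  norm_num
  rw [go_one _ _ _ _ (by simp)]
  simp [h]

set_option maxRecDepth 4096 in
-- the whole post-base computation of A equals that of B, for every base string
theorem body_eq (b : String) :
    (match familyLoop ["nucleon", "pseudoscalar", "scalar", "vector", "axial_vector", "glueball", "tensor"] b with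
     | some p => p
     | none =>
       if PySem.Str.isIn "_" b then
         match PySem.Str.splitMax? b "_" 1 with
         | some (x :: _) => x
         | _ => ""
       else b) =
    (if b == "axial_vector" || PySem.Str.startswith b "axial_vector_" then "axial_vector"
     else String.ofList (b.toList.takeWhile (· != '_'))) := by
  simp only [familyLoop,
    show ("nucleon" ++ "_" : String) = "nucleon_" from rfl,
    show ("pseudoscalar" ++ "_" : String) = "pseudoscalar_" from rfl,
    show ("scalar" ++ "_" : String) = "scalar_" from rfl,
    show ("vector" ++ "_" : String) = "vector_" from rfl,
    show ("axial_vector" ++ "_" : String) = "axial_vector_" from rfl,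
    show ("glueball" ++ "_" : String) = "glueball_" from rfl,
    show ("tensor" ++ "_" : String) = "tensor_" from rfl,
    Bool.or_eq_true, beq_iff_eq, PySem.Str.startswith_eq, PySem.Str.isIn_eq]
  by_cases h1 : b = "nucleon" ∨ PySem.Chars.startswith b.toList "nucleon_".toList = true
  · have hax : ¬(b = "axial_vector" ∨ PySem.Chars.startswith b.toList "axial_vector_".toList = true) := fun hax =>
      cond_conflict (condc h1) (condc hax) (by decide) (by decide) (by decide)
    rw [if_pos h1, if_neg hax]
    exact (match_case (by decide) (by rw [← List.all_eq_true]; decide) h1).symm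
  · by_cases h2 : b = "pseudoscalar" ∨ PySem.Chars.startswith b.toList "pseudoscalar_".toList = true
    · have hax : ¬(b = "axial_vector" ∨ PySem.Chars.startswith b.toList "axial_vector_".toList = true) := fun hax =>
        cond_conflict (condc h2) (condc hax) (by decide) (by decide) (by decide)
      rw [if_neg h1, if_pos h2, if_neg hax]
      exact (match_case (by decide) (by rw [← List.all_eq_true]; decide) h2).symm
    · by_cases h3 : b = "scalar" ∨ PySem.Chars.startswith b.toList "scalar_".toList = true
      · have hax : ¬(b = "axial_vector" ∨ PySem.Chars.startswith b.toList "axial_vector_".toList = true) := fun hax =>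
          cond_conflict (condc h3) (condc hax) (by decide) (by decide) (by decide)
        rw [if_neg h1, if_neg h2, if_pos h3, if_neg hax]
        exact (match_case (by decide) (by rw [← List.all_eq_true]; decide) h3).symm
      · by_cases h4 : b = "vector" ∨ PySem.Chars.startswith b.toList "vector_".toList = true
        · have hax : ¬(b = "axial_vector" ∨ PySem.Chars.startswith b.toList "axial_vector_".toList = true) := fun hax =>
            cond_conflict (condc h4) (condc hax) (by decide) (by decide) (by decide)
          rw [if_neg h1, if_neg h2, if_neg h3, if_pos h4, if_neg hax]
          exact (match_case (by decide) (by rw [← List.all_eq_true]; decide) h4).symm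
        · by_cases h5 : b = "axial_vector" ∨ PySem.Chars.startswith b.toList "axial_vector_".toList = true
          · rw [if_neg h1, if_neg h2, if_neg h3, if_neg h4, if_pos h5, if_pos h5]
          · by_cases h6 : b = "glueball" ∨ PySem.Chars.startswith b.toList "glueball_".toList = true
            · rw [if_neg h1, if_neg h2, if_neg h3, if_neg h4, if_neg h5, if_pos h6, if_neg h5]
              exact (match_case (by decide) (by rw [← List.all_eq_true]; decide) h6).symm
            · by_cases h7 : b = "tensor" ∨ PySem.Chars.startswith b.toList "tensor_".toList = true
              · rw [if_neg h1, if_neg h2, if_neg h3, if_neg h4, if_neg h5, if_neg h6, if_pos h7, if_neg h5]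
                exact (match_case (by decide) (by rw [← List.all_eq_true]; decide) h7).symm
              · rw [if_neg h1, if_neg h2, if_neg h3, if_neg h4, if_neg h5, if_neg h6, if_neg h7, if_neg h5]
                by_cases hu : PySem.Chars.isIn "_".toList b.toList = true
                · rw [if_pos hu]
                  have hmem : '_' ∈ b.toList := by
                    rw [show ("_".toList : List Char) = ['_'] from rfl, PySem.Chars.isIn_iff_infix] at hu
                    exact (List.singleton_infix_iff _ _).mp hu
                  exact split_head b hmem
                · rw [if_neg hu]
                  have hmem : '_' ∉ b.toList := by
                    intro hm
                    exact hu (by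
                      rw [show ("_".toList : List Char) = ['_'] from rfl, PySem.Chars.isIn_iff_infix]
                      exact (List.singleton_infix_iff _ _).mpr hm)
                  rw [List.takeWhile_eq_self_iff.mpr (fun x hx => by
                        simp only [bne_iff_ne, ne_eq]
                        rintro rfl; exact hmem hx),
                      String.ofList_toList]


-- ===== VERDICT (by name: the statement is the Claim_ definition above) =====
theorem channel_family_key_spec : Claim_equal_channel_family_key := by
  intro name _
  show channel_family_key name = channel_family_key_alt name
  simp only [channel_family_key, channel_family_key_alt]
  exact body_eq (base_channel_name name)
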